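-- pv_equiv track=rewrite | github.com/AlexaGutieMora/IA_P2 | Enfoque3_Logica/01_LógicaProposicional/006_EncadenamientoHaciaAdelanteYAtrás.py | hacia_atras
-- ===== SOURCE A (Python) =====
-- hechos = {"A"}
--
-- reglas = [
--     {"antecedentes": {"A"}, "consecuente": "B"},
--     {"antecedentes": {"B"}, "consecuente": "C"}
-- ]
--
-- def hacia_atras(obj):
--     if obj in hechos:
--         return True
--     for regla in reglas:
--         if regla["consecuente"] == obj:
--             if all(hacia_atras(premisa) for premisa in regla["antecedentes"]):
--                 return True
--     return False
-- ===== SOURCE B (Python) =====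
-- hechos = {"A"}
--
-- reglas = [
--     {"antecedentes": {"A"}, "consecuente": "B"},
--     {"antecedentes": {"B"}, "consecuente": "C"}
-- ]
--
-- def hacia_atras(obj):
--     # Bottom-up forward chaining: saturate the fact set, then test membership.
--     # len(reglas) cumulative passes suffice: each productive pass adds at least
--     # one of the len(reglas) consequents, so the set is closed afterwards.
--     derivados = set(hechos)
--     for _ in range(len(reglas)):
--         for regla in reglas:
--             if regla["consecuente"] not in derivados and regla["antecedentes"] <= derivados:
--                 derivados.add(regla["consecuente"])
--     return obj in derivados
-- ===== Notes on version B (the rewrite author's own statement) =====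
-- stated objective: alternative
-- what changed: Top-down recursive backward chaining over goals is replaced by bottom-up forward chaining: a bounded number of cumulative passes over the rules saturates the derived-fact set, and the goal is tested by membership.
import Mathlib
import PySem

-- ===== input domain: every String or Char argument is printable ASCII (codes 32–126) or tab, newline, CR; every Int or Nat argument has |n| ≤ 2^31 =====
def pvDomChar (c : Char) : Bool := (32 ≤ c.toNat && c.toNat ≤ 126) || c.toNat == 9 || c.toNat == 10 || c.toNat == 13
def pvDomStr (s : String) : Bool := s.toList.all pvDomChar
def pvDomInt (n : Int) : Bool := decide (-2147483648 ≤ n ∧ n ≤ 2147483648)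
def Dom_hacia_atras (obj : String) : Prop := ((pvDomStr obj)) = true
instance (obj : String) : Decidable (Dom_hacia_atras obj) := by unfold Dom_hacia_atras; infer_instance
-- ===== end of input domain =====

-- B replaces A's top-down recursive backward chaining by bottom-up forward chaining
-- (bounded cumulative passes saturate the derived-fact set, then a membership test).

-- module-level constants shared by both Pythons: hechos = {"A"}, reglas as (antecedentes, consecuente)
def pvHechos : List String := ["A"]
def pvReglas : List (List String × String) := [(["A"], "B"), (["B"], "C")]

-- ===== PORT A =====
-- termination measure for A's recursion on the fixed acyclic rule base
def pvRank (s : String) : Nat := if s = "C" then 2 else if s = "B" then 1 else 0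

def hacia_atras (obj : String) : Bool :=
  if obj ∈ pvHechos then true
  else
    pvReglas.attach.any (fun r =>
      if r.1.2 = obj then
        r.1.1.attach.all (fun p => hacia_atras p.1)
      else false)
termination_by pvRank obj
decreasing_by
  obtain ⟨r, hr⟩ := r
  obtain ⟨p, hp⟩ := p
  simp [pvReglas] at hr
  rcases hr with h | h <;> subst h <;> simp at hp <;> subst hp <;>
    (rename_i hc; subst hc; simp [pvRank])

-- ===== PORT B =====
def hacia_atras_alt (obj : String) : Bool :=
  let derivados :=
    (List.range pvReglas.length).foldl
      (fun d _ =>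
        pvReglas.foldl
          (fun d r =>
            if !(d.contains r.2) && r.1.all (fun a => d.contains a) then d ++ [r.2] else d)
          d)
      pvHechos
  derivados.contains obj

-- ===== PRECONDITION & SPEC =====
def Spec_hacia_atras (obj : String) (out : Bool) : Prop := out = hacia_atras_alt obj
instance (obj : String) (out : Bool) : Decidable (Spec_hacia_atras obj out) := by unfold Spec_hacia_atras; infer_instance

-- ===== CLAIM (what is proved, stated in full; the proofs are below) =====
def Claim_equal_hacia_atras : Prop := ∀ (obj : String), Dom_hacia_atras obj → Spec_hacia_atras obj (hacia_atras obj)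

-- ===== LEMMAS AND PROOFS =====
lemma alt_eval (obj : String) :
    hacia_atras_alt obj = (decide (obj = "A") || (decide (obj = "B") || decide (obj = "C"))) := by
  simp [hacia_atras_alt, pvReglas, pvHechos, List.range, List.range.loop]

lemma a_base : hacia_atras "A" = true := by
  rw [hacia_atras]; simp [pvHechos]

lemma a_b : hacia_atras "B" = true := by
  rw [hacia_atras]; simp [pvHechos, pvReglas, List.attach, List.attachWith, a_base]

lemma a_c : hacia_atras "C" = true := by
  rw [hacia_atras]; simp [pvHechos, pvReglas, List.attach, List.attachWith, a_b]

lemma a_eval (obj : String) :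
    hacia_atras obj = (decide (obj = "A") || (decide (obj = "B") || decide (obj = "C"))) := by
  by_cases h1 : obj = "A"; · subst h1; simp [a_base]
  by_cases h2 : obj = "B"; · subst h2; simp [a_b]
  by_cases h3 : obj = "C"; · subst h3; simp [a_c]
  rw [hacia_atras]
  simp [pvHechos, pvReglas, List.attach, List.attachWith, h1, h2, h3, Ne.symm h2, Ne.symm h3]

-- ===== VERDICT (by name: the statement is the Claim_ definition above) =====
theorem hacia_atras_spec : Claim_equal_hacia_atras := by
  intro obj _
  unfold Spec_hacia_atras
  rw [a_eval, alt_eval]
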